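-- pv_equiv track=rewrite | github.com/roman91DE/openWbn | geodata/script.py | _chain_ways
-- ===== SOURCE A (Python) =====
-- def _chain_ways(segments):
--     """Chain way segments into a closed ring."""
--     if not segments:
--         return []
--     ring = list(segments.pop(0))
--     while segments:
--         last = ring[-1]
--         found = False
--         for i, seg in enumerate(segments):
--             if seg[0] == last:
--                 ring.extend(seg[1:])
--                 segments.pop(i)
--                 found = True
--                 break
--             elif seg[-1] == last:
--                 ring.extend(reversed(seg[:-1]))
--                 segments.pop(i)
--                 found = True
--                 break
--         if not found:
--             break
--     return ring
-- ===== SOURCE B (Python) =====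
-- def _chain_ways(segments):
--     """Chain way segments into a closed ring.
--
--     One pass builds endpoint indexes (ascending index lists per coordinate);
--     each chaining step then picks the matching segment of least original
--     index from the lazily pruned candidate lists instead of rescanning the
--     remaining segments.  Does not mutate `segments`.
--     """
--     if not segments:
--         return []
--     n = len(segments)
--     ring = list(segments[0])
--     starts = {}
--     ends = {}
--     for i in range(1, n):
--         seg = segments[i]
--         starts.setdefault(seg[0], []).append(i)
--         ends.setdefault(seg[-1], []).append(i)
--     used = [False] * n
--     used[0] = True
--     remaining = n - 1
--     while remaining:
--         last = ring[-1]
--         s = starts.get(last, [])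
--         while s and used[s[0]]:
--             s.pop(0)
--         e = ends.get(last, [])
--         while e and used[e[0]]:
--             e.pop(0)
--         if s and (not e or s[0] <= e[0]):
--             seg = segments[s[0]]
--             used[s[0]] = True
--             ring.extend(seg[1:])
--         elif e:
--             seg = segments[e[0]]
--             used[e[0]] = True
--             ring.extend(reversed(seg[:-1]))
--         else:
--             break
--         remaining -= 1
--     return ring
-- ===== Notes on version B (the rewrite author's own statement) =====
-- stated objective: alternative
-- what changed: A rescans the whole remaining segment list on every chaining step; B instead builds endpoint-to-index-list maps in one pass and picks the least-index matching segment per step from lazily pruned candidate lists, so the inner rescan disappears (and B does not mutate the input list).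
import Mathlib
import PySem

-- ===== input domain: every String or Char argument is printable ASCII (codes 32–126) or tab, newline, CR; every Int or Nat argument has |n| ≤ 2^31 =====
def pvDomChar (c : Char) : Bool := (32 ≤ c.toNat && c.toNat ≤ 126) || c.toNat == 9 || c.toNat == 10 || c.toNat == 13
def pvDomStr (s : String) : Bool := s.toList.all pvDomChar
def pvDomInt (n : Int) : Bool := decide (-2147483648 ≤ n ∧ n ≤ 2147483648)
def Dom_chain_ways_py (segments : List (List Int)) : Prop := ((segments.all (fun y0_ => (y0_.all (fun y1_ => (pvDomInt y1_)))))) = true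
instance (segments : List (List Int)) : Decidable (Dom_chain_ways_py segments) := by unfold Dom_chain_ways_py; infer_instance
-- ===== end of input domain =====

-- B replaces A's repeated linear rescans with endpoint→index-list maps built in one pass;
-- equivalence is about the RETURN value only (A pops from `segments` in place, B does not mutate it).

-- ===== PORT A =====
-- the for-loop body: first segment matching `last` at its head (checked first) or its tail,
-- returned with the remaining list (the pop); `none` on no match; an empty segment would
-- raise IndexError at seg[0] in Python (excluded by Pre_), we stop the scan there.
def findMatchA (last : Int) : List (List Int) → Option (Bool × List Int × List (List Int))
  | [] => none
  | seg :: t =>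
    if seg = [] then none
    else if seg.head? = some last then some (true, seg, t)
    else if seg.getLast? = some last then some (false, seg, t)
    else
      match findMatchA last t with
      | some (b, s, r) => some (b, s, seg :: r)
      | none => none

-- the while-loop of A: pick the first matching segment, extend the ring, repeat;
-- each iteration pops one segment, so the loop runs at most segs.length times (the fuel)
def chainALoop : Nat → List (List Int) → List Int → List Int
  | 0, _, ring => ring
  | fuel+1, segs, ring =>
    if segs = [] then ring
    else
      match ring.getLast? with
      | none => ring        -- ring[-1]: IndexError in Python (excluded by Pre_)
      | some last =>
        match findMatchA last segs with
        | some (b, seg, rest) =>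
            chainALoop fuel rest (ring ++ (if b then seg.drop 1 else seg.dropLast.reverse))
        | none => ring

def chainA (segs : List (List Int)) (ring : List Int) : List Int :=
  chainALoop segs.length segs ring

def chain_ways_py (segments : List (List Int)) : List Int :=
  match segments with
  | [] => []
  | first :: rest => chainA rest first

-- ===== PORT B =====
-- the while-loop of B: `rem` is Source B's `remaining` counter; the two dropWhile are the
-- lazy `while s and used[s[0]]: s.pop(0)` prunes (stored back, as the Python mutation does)
def chainB (segments : List (List Int)) :
    Nat → List Int → PySem.Dict Int (List Nat) → PySem.Dict Int (List Nat) → List Bool → List Int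
  | 0, ring, _, _, _ => ring
  | rem+1, ring, starts, ends, used =>
    match ring.getLast? with
    | none => ring        -- ring[-1]: IndexError in Python (excluded by Pre_)
    | some last =>
      let s := (starts.getD last []).dropWhile (fun i => used.getD i false)
      let e := (ends.getD last []).dropWhile (fun i => used.getD i false)
      let starts' := starts.insert last s
      let ends' := ends.insert last e
      match s, e with
      | [], [] => ring
      | si :: _, [] =>
          chainB segments rem (ring ++ (segments.getD si []).drop 1) starts' ends' (used.set si true)
      | [], ei :: _ =>
          chainB segments rem (ring ++ ((segments.getD ei []).dropLast).reverse) starts' ends' (used.set ei true)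
      | si :: _, ei :: _ =>
          if si ≤ ei then
            chainB segments rem (ring ++ (segments.getD si []).drop 1) starts' ends' (used.set si true)
          else
            chainB segments rem (ring ++ ((segments.getD ei []).dropLast).reverse) starts' ends' (used.set ei true)

def chain_ways_py_alt (segments : List (List Int)) : List Int :=
  match segments with
  | [] => []
  | first :: _ =>
    let n := segments.length
    let se := (List.range' 1 (n-1)).foldl
      (fun (se : PySem.Dict Int (List Nat) × PySem.Dict Int (List Nat)) i =>
        let seg := segments.getD i []
        (se.1.modify (seg.headD 0) [] (· ++ [i]),
         se.2.modify (seg.getLastD 0) [] (· ++ [i])))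
      (PySem.Dict.empty, PySem.Dict.empty)
    let used := (List.replicate n false).set 0 true
    chainB segments (n-1) first se.1 se.2 used

-- ===== PRECONDITION & SPEC =====
-- Pre_ excludes exactly the inputs on which A raises IndexError: an empty segment in the
-- tail, or an empty first segment followed by further segments (ring[-1] / seg[0] / seg[-1] on []).
def Pre_chain_ways_py (segments : List (List Int)) : Prop :=
  (∀ s ∈ segments.tail, s ≠ []) ∧ (segments.headD [] = [] → segments.length ≤ 1)
instance (segments : List (List Int)) : Decidable (Pre_chain_ways_py segments) := by
  unfold Pre_chain_ways_py; infer_instance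

def pvWitness_chain_ways_py : List (List Int) := [[1, 2], [2, 3], [3, 1]]

def Spec_chain_ways_py (segments : List (List Int)) (out : List Int) : Prop := out = chain_ways_py_alt segments
instance (segments : List (List Int)) (out : List Int) : Decidable (Spec_chain_ways_py segments out) := by unfold Spec_chain_ways_py; infer_instance

-- ===== CLAIM (what is proved, stated in full; the proofs are below) =====
def Claim_equal_chain_ways_py : Prop := ∀ (segments : List (List Int)), Dom_chain_ways_py segments → Pre_chain_ways_py segments → Spec_chain_ways_py segments (chain_ways_py segments)

-- ===== LEMMAS AND PROOFS =====

-- i-th segment, unused-test, tail index range, and the two match predicates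
def pvF (segments : List (List Int)) (i : Nat) : List Int := segments.getD i []
def pvU (used : List Bool) (i : Nat) : Bool := used.getD i false
def pvR (n : Nat) : List Nat := List.range' 1 (n-1)
def pvPs (segments : List (List Int)) (last : Int) (i : Nat) : Bool := (pvF segments i).head? == some last
def pvPe (segments : List (List Int)) (last : Int) (i : Nat) : Bool := (pvF segments i).getLast? == some last
-- a stored index list S is the tail of the full ascending index list L, the dropped prefix all used
def SuffInv (used : List Bool) (L S : List Nat) : Prop := ∃ p, L = p ++ S ∧ ∀ i ∈ p, pvU used i = true

-- the generic first-match picker: first list element satisfying P, with the list without it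
def pickIdx (P : Nat → Bool) : List Nat → Option (Nat × List Nat)
  | [] => none
  | i :: t => if P i then some (i, t)
      else (pickIdx P t).map (fun jr => (jr.1, i :: jr.2))

-- A's scan over the (nonempty) segments indexed by `idxs` is pickIdx on the indices
theorem findMatchA_map (segments : List (List Int)) (last : Int) :
    ∀ (idxs : List Nat), (∀ i ∈ idxs, pvF segments i ≠ []) →
    findMatchA last (idxs.map (pvF segments)) =
      (pickIdx (fun i => pvPs segments last i || pvPe segments last i) idxs).map
        (fun jr => (pvPs segments last jr.1, pvF segments jr.1, jr.2.map (pvF segments))) := by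
  intro idxs
  induction idxs with
  | nil => intro _; rfl
  | cons i t ih =>
    intro hne
    have hi : pvF segments i ≠ [] := hne i (by simp)
    simp only [List.map_cons, findMatchA, pickIdx, hi, if_false]
    by_cases h1 : pvPs segments last i
    · have h1' : (pvF segments i).head? = some last := by simpa [pvPs] using h1
      simp [h1', h1, pvPs]
    · have h1' : ¬ (pvF segments i).head? = some last := by simpa [pvPs] using h1
      by_cases h2 : pvPe segments last i
      · have h2' : (pvF segments i).getLast? = some last := by simpa [pvPe] using h2
        simp [h1', h2', h1, h2, pvPs, pvPe]
      · have h2' : ¬ (pvF segments i).getLast? = some last := by simpa [pvPe] using h2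
        rw [ih (fun j hj => hne j (by simp [hj]))]
        simp only [h1, h2, Bool.or_self, if_neg h1', if_neg h2', Bool.false_or]
        cases pickIdx (fun i => pvPs segments last i || pvPe segments last i) t with
        | none => simp
        | some jr => simp

theorem head?_dropWhile_eq_head?_filter (p : Nat → Bool) :
    ∀ (l : List Nat), (l.dropWhile p).head? = (l.filter (fun x => !p x)).head? := by
  intro l
  induction l with
  | nil => rfl
  | cons a t ih =>
    by_cases h : p a
    · simpa [List.dropWhile_cons, List.filter_cons, h] using ih
    · simp [List.dropWhile_cons, List.filter_cons, h]

theorem head?_filter_some {P : Nat → Bool} {u : List Nat} {a : Nat}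
    (h : (u.filter P).head? = some a) : a ∈ u ∧ P a = true := by
  have ha : a ∈ u.filter P := by
    obtain ⟨ys, hys⟩ := List.head?_eq_some_iff.mp h
    simp [hys]
  exact ⟨List.mem_of_mem_filter ha, List.of_mem_filter ha⟩

theorem head?_filter_min {P : Nat → Bool} {u : List Nat} {a : Nat}
    (hs : u.Pairwise (· < ·))
    (h : (u.filter P).head? = some a) : ∀ i ∈ u, P i = true → a ≤ i := by
  intro i hi hPi
  have hif : i ∈ u.filter P := List.mem_filter.mpr ⟨hi, hPi⟩
  have hpf : (u.filter P).Pairwise (· < ·) := hs.filter P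
  obtain ⟨ys, hys⟩ := List.head?_eq_some_iff.mp h
  rw [hys] at hif hpf
  rcases List.mem_cons.mp hif with rfl | hmem
  · exact le_refl _
  · exact le_of_lt ((List.pairwise_cons.mp hpf).1 i hmem)

theorem head?_filter_none {P : Nat → Bool} {u : List Nat}
    (h : (u.filter P).head? = none) : ∀ i ∈ u, P i = false := by
  intro i hi
  have h1 : u.filter P = [] := List.head?_eq_none_iff.mp h
  have h2 := List.filter_eq_nil_iff.mp h1 i hi
  simpa using h2

theorem filter_ne_of_lt {t : List Nat} {i : Nat} (h : ∀ j ∈ t, i < j) :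
    t.filter (fun j => !(j == i)) = t := by
  apply List.filter_eq_self.mpr
  intro j hj
  simp [Nat.ne_of_gt (h j hj)]

-- which of the two candidate heads B's branch selects
def pickSel (u : List Nat) : Option Nat → Option Nat → Option (Nat × List Nat)
  | none, none => none
  | some a, none => some (a, u.filter (fun i => !(i == a)))
  | none, some b => some (b, u.filter (fun i => !(i == b)))
  | some a, some b =>
      if a ≤ b then some (a, u.filter (fun i => !(i == a)))
      else some (b, u.filter (fun i => !(i == b)))

-- the first combined match on a strictly ascending list is the smaller of the two filter heads
theorem pick_step (Ps Pe : Nat → Bool) :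
    ∀ (u : List Nat), u.Pairwise (· < ·) →
    pickIdx (fun i => Ps i || Pe i) u = pickSel u ((u.filter Ps).head?) ((u.filter Pe).head?) := by
  intro u
  induction u with
  | nil => intro _; rfl
  | cons i t ih =>
    intro hp
    obtain ⟨hlt, ht⟩ := List.pairwise_cons.mp hp
    by_cases hPs : Ps i
    · have hfs : (List.filter Ps (i :: t)).head? = some i := by simp [List.filter_cons, hPs]
      have hrest : (i :: t).filter (fun j => !(j == i)) = t := by
        simp only [List.filter_cons, beq_self_eq_true, Bool.not_true, cond_false]
        simpa using filter_ne_of_lt hlt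
      by_cases hPe : Pe i
      · have hfe : (List.filter Pe (i :: t)).head? = some i := by simp [List.filter_cons, hPe]
        simp [pickIdx, hPs, hPe, hfs, hfe, pickSel, hrest]
      · have hfe : (List.filter Pe (i :: t)).head? = (t.filter Pe).head? := by
          simp [List.filter_cons, hPe]
        rw [hfe]
        cases hfe' : (t.filter Pe).head? with
        | none => simp [pickIdx, hPs, hfs, hfe', pickSel, hrest]
        | some b =>
          have hb : b ∈ t := (head?_filter_some hfe').1
          have hib : i ≤ b := le_of_lt (hlt b hb)
          simp [pickIdx, hPs, hfs, hfe', pickSel, hib, hrest]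
    · by_cases hPe : Pe i
      · have hfe : (List.filter Pe (i :: t)).head? = some i := by simp [List.filter_cons, hPe]
        have hfs : (List.filter Ps (i :: t)).head? = (t.filter Ps).head? := by
          simp [List.filter_cons, hPs]
        have hrest : (i :: t).filter (fun j => !(j == i)) = t := by
          simp only [List.filter_cons, beq_self_eq_true, Bool.not_true, cond_false]
          simpa using filter_ne_of_lt hlt
        rw [hfs]
        cases hfs' : (t.filter Ps).head? with
        | none => simp [pickIdx, hPs, hPe, hfs', hfe, pickSel, hrest]
        | some a =>
          have ha : a ∈ t := (head?_filter_some hfs').1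
          have hai : ¬ a ≤ i := not_le.mpr (hlt a ha)
          simp [pickIdx, hPs, hPe, hfs', hfe, pickSel, hai, hrest]
      · have hfs : (List.filter Ps (i :: t)).head? = (t.filter Ps).head? := by
          simp [List.filter_cons, hPs]
        have hfe : (List.filter Pe (i :: t)).head? = (t.filter Pe).head? := by
          simp [List.filter_cons, hPe]
        rw [hfs, hfe, pickIdx]
        simp only [hPs, hPe, Bool.or_self, if_false, Bool.false_or]
        rw [ih ht]
        cases hfs' : (t.filter Ps).head? with
        | none =>
          cases hfe' : (t.filter Pe).head? with
          | none => rfl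
          | some b =>
            have hb : b ∈ t := (head?_filter_some hfe').1
            have hbi : ¬ (b == i) = true := by simp [Nat.ne_of_gt (hlt b hb)]
            have hib : ¬ i = b := Nat.ne_of_lt (hlt b hb)
            simp [pickSel, List.filter_cons, hbi, hib]
        | some a =>
          have ha : a ∈ t := (head?_filter_some hfs').1
          have hai : ¬ (a == i) = true := by simp [Nat.ne_of_gt (hlt a ha)]
          cases hfe' : (t.filter Pe).head? with
          | none =>
            have hia : ¬ i = a := Nat.ne_of_lt (hlt a ha)
            simp [pickSel, List.filter_cons, hai, hia]
          | some b =>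
            have hb : b ∈ t := (head?_filter_some hfe').1
            have hbi : ¬ (b == i) = true := by simp [Nat.ne_of_gt (hlt b hb)]
            have hia : ¬ i = a := Nat.ne_of_lt (hlt a ha)
            have hib : ¬ i = b := Nat.ne_of_lt (hlt b hb)
            by_cases hab : a ≤ b
            · simp [pickSel, hab, List.filter_cons, hai, hia]
            · simp [pickSel, hab, List.filter_cons, hbi, hib]

-- pvU under List.set
theorem pvU_set_self {used : List Bool} {j : Nat} (h : j < used.length) :
    pvU (used.set j true) j = true := by
  simp [pvU, List.getD_eq_getElem?_getD, List.getElem?_set, h]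

theorem pvU_set_ne {used : List Bool} {i j : Nat} (h : i ≠ j) :
    pvU (used.set j true) i = pvU used i := by
  simp [pvU, List.getD_eq_getElem?_getD, List.getElem?_set, (Ne.symm h)]

theorem pvU_set_mono {used : List Bool} {j i : Nat} (h : pvU used i = true) :
    pvU (used.set j true) i = true := by
  by_cases hij : i = j
  · subst hij
    by_cases hlen : i < used.length
    · exact pvU_set_self hlen
    · rw [List.set_eq_of_length_le (le_of_not_gt hlen)]; exact h
  · rw [pvU_set_ne hij]; exact h

-- SuffInv toolkit
theorem suffInv_filter {used : List Bool} {L S : List Nat} (h : SuffInv used L S) :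
    L.filter (fun i => !pvU used i) = S.filter (fun i => !pvU used i) := by
  obtain ⟨p, rfl, hp⟩ := h
  rw [List.filter_append]
  have hnil : p.filter (fun i => !pvU used i) = [] := by
    apply List.filter_eq_nil_iff.mpr
    intro i hi; simp [hp i hi]
  simp [hnil]

theorem suffInv_dropWhile {used : List Bool} {L S : List Nat} (h : SuffInv used L S) :
    SuffInv used L (S.dropWhile (fun i => pvU used i)) := by
  obtain ⟨p, rfl, hp⟩ := h
  refine ⟨p ++ S.takeWhile (fun i => pvU used i), ?_, ?_⟩
  · rw [List.append_assoc, List.takeWhile_append_dropWhile]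
  · intro i hi
    rcases List.mem_append.mp hi with hi | hi
    · exact hp i hi
    · exact List.mem_takeWhile_imp hi

theorem suffInv_mono {used used' : List Bool} {L S : List Nat}
    (hm : ∀ i, pvU used i = true → pvU used' i = true) (h : SuffInv used L S) :
    SuffInv used' L S := by
  obtain ⟨p, rfl, hp⟩ := h
  exact ⟨p, rfl, fun i hi => hm i (hp i hi)⟩

-- inserting the pruned candidate list back and marking an index used keeps the invariant
theorem suffInv_insert_step {used : List Bool} {j : Nat} {d : PySem.Dict Int (List Nat)}
    {L : Int → List Nat} {last : Int}
    (h : ∀ v, SuffInv used (L v) (d.getD v [])) :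
    ∀ v, SuffInv (used.set j true) (L v)
      ((d.insert last ((d.getD last []).dropWhile (fun i => used.getD i false))).getD v []) := by
  intro v
  by_cases hv : v = last
  · subst hv
    rw [PySem.Dict.getD_insert_self]
    exact suffInv_mono (fun i => pvU_set_mono) (suffInv_dropWhile (h v))
  · rw [PySem.Dict.getD_insert_of_ne]
    · exact suffInv_mono (fun i => pvU_set_mono) (h v)
    · exact hv

-- updating `used` refines the unused-index list by removing j
theorem filter_unused_set {n : Nat} {used : List Bool} {j : Nat}
    (hlen : used.length = n) (hj : j < n) :
    (pvR n).filter (fun i => !pvU (used.set j true) i)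
      = ((pvR n).filter (fun i => !pvU used i)).filter (fun i => !(i == j)) := by
  rw [List.filter_filter]
  apply List.filter_congr
  intro i _
  by_cases hij : i = j
  · subst hij
    have hs : pvU (used.set i true) i = true := pvU_set_self (by omega)
    simp [hs]
  · rw [pvU_set_ne hij]
    simp [hij]

theorem length_filter_ne {u : List Nat} {j : Nat} (hj : j ∈ u) (hnd : u.Nodup) :
    (u.filter (fun i => !(i == j))).length = u.length - 1 := by
  have h1 : u.filter (fun i => !(i == j)) = u.erase j := by
    rw [List.Nodup.erase_eq_filter hnd]
    apply List.filter_congr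
    intro i _
    simp [bne]
  rw [h1, List.length_erase_of_mem hj]

theorem mem_pvR_lt {n i : Nat} (h : i ∈ pvR n) : 1 ≤ i ∧ i < n := by
  have := List.mem_range'_1.mp h
  omega

-- the simulation: A's scan-and-pop loop equals B's indexed loop on related states
theorem sim (segments : List (List Int)) (n : Nat) (hn : n = segments.length)
    (hfne : ∀ i ∈ pvR n, pvF segments i ≠ []) :
    ∀ (rem : Nat) (used : List Bool) (starts ends : PySem.Dict Int (List Nat)) (ring : List Int),
    used.length = n →
    (∀ v, SuffInv used ((pvR n).filter (pvPs segments v)) (starts.getD v [])) →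
    (∀ v, SuffInv used ((pvR n).filter (pvPe segments v)) (ends.getD v [])) →
    rem = ((pvR n).filter (fun i => !pvU used i)).length →
    chainA (((pvR n).filter (fun i => !pvU used i)).map (pvF segments)) ring
      = chainB segments rem ring starts ends used := by
  intro rem
  induction rem with
  | zero =>
    intro used starts ends ring hlen hs he hrem
    have hu : (pvR n).filter (fun i => !pvU used i) = [] :=
      List.length_eq_zero_iff.mp hrem.symm
    rw [hu]
    simp [chainA, chainALoop, chainB]
  | succ k ih =>
    intro used starts ends ring hlen hs he hrem
    have hR : (pvR n).Pairwise (· < ·) := List.pairwise_lt_range' 1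
    have hup : ((pvR n).filter (fun i => !pvU used i)).Pairwise (· < ·) := hR.filter _
    have hund : ((pvR n).filter (fun i => !pvU used i)).Nodup :=
      hup.imp (fun h => Nat.ne_of_lt h)
    have hune : (pvR n).filter (fun i => !pvU used i) ≠ [] := by
      intro h; rw [h] at hrem; simp at hrem
    set u := (pvR n).filter (fun i => !pvU used i) with hu
    have hfneu : ∀ i ∈ u, pvF segments i ≠ [] :=
      fun i hi => hfne i (List.mem_of_mem_filter hi)
    have hmapne : ¬ (u.map (pvF segments)) = [] := by simpa using hune
    have hlm : (u.map (pvF segments)).length = k + 1 := by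
      rw [List.length_map]; omega
    rw [chainA, hlm, chainALoop, if_neg hmapne]
    cases hr : ring.getLast? with
    | none => simp [chainB, hr]
    | some last =>
      show (match findMatchA last (u.map (pvF segments)) with
        | some (b, seg, rest) =>
            chainALoop k rest (ring ++ (if b then seg.drop 1 else seg.dropLast.reverse))
        | none => ring) = chainB segments (k+1) ring starts ends used
      have hfind := findMatchA_map segments last u hfneu
      rw [pick_step (pvPs segments last) (pvPe segments last) u hup] at hfind
      -- B's pruned candidate lists have the heads of A's filters
      have hsh : ((starts.getD last []).dropWhile (fun i => used.getD i false)).head?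
          = (u.filter (pvPs segments last)).head? := by
        rw [show (fun i => used.getD i false) = (fun i => pvU used i) from rfl,
          head?_dropWhile_eq_head?_filter, ← suffInv_filter (hs last), hu,
          List.filter_filter, List.filter_filter]
        exact congrArg _ (List.filter_congr (fun x _ => Bool.and_comm _ _))
      have heh : ((ends.getD last []).dropWhile (fun i => used.getD i false)).head?
          = (u.filter (pvPe segments last)).head? := by
        rw [show (fun i => used.getD i false) = (fun i => pvU used i) from rfl,
          head?_dropWhile_eq_head?_filter, ← suffInv_filter (he last), hu,
          List.filter_filter, List.filter_filter]
        exact congrArg _ (List.filter_congr (fun x _ => Bool.and_comm _ _))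
      -- a chosen index j with its ring extension: both loops recurse on related states
      have step : ∀ (j : Nat), j ∈ u → ∀ (ext : List Int),
          chainALoop k ((u.filter (fun i => !(i == j))).map (pvF segments)) (ring ++ ext)
            = chainB segments k (ring ++ ext)
              (starts.insert last ((starts.getD last []).dropWhile (fun i => used.getD i false)))
              (ends.insert last ((ends.getD last []).dropWhile (fun i => used.getD i false)))
              (used.set j true) := by
        intro j hj ext
        have hjR : j ∈ pvR n := List.mem_of_mem_filter hj
        have hjn : j < n := (mem_pvR_lt hjR).2
        have hfus := filter_unused_set (n := n) (used := used) (j := j) hlen hjn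
        rw [← hu] at hfus
        have hrem' : k = ((pvR n).filter (fun i => !pvU (used.set j true) i)).length := by
          rw [hfus, length_filter_ne hj hund]; omega
        have hrec := ih (used.set j true)
          (starts.insert last ((starts.getD last []).dropWhile (fun i => used.getD i false)))
          (ends.insert last ((ends.getD last []).dropWhile (fun i => used.getD i false)))
          (ring ++ ext)
          (by rw [List.length_set]; exact hlen)
          (suffInv_insert_step hs)
          (suffInv_insert_step he)
          hrem'
        rw [hfus] at hrec
        rw [chainA, List.length_map, length_filter_ne hj hund, ← hrem] at hrec
        exact hrec
      -- case on B's two candidate lists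
      cases hS : (starts.getD last []).dropWhile (fun i => used.getD i false) with
      | nil =>
        have hsn : (u.filter (pvPs segments last)).head? = none := by rw [← hsh, hS]; rfl
        cases hE : (ends.getD last []).dropWhile (fun i => used.getD i false) with
        | nil =>
          have hen : (u.filter (pvPe segments last)).head? = none := by rw [← heh, hE]; rfl
          rw [hsn, hen] at hfind
          rw [hfind]
          simp only [chainB, hr, hS, hE, pickSel, Option.map_none]
        | cons ei e' =>
          have hee : (u.filter (pvPe segments last)).head? = some ei := by rw [← heh, hE]; rfl
          rw [hsn, hee] at hfind
          have hei := head?_filter_some hee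
          have hbf : pvPs segments last ei = false := head?_filter_none hsn ei hei.1
          rw [hfind]
          simp only [pickSel, Option.map_some, hbf, Bool.false_eq_true, if_false]
          have hstep := step ei hei.1 ((pvF segments ei).dropLast.reverse)
          rw [hstep]
          simp only [chainB, hr, hS, hE]
          rfl
      | cons si s' =>
        have hss : (u.filter (pvPs segments last)).head? = some si := by rw [← hsh, hS]; rfl
        have hsi := head?_filter_some hss
        cases hE : (ends.getD last []).dropWhile (fun i => used.getD i false) with
        | nil =>
          have hen : (u.filter (pvPe segments last)).head? = none := by rw [← heh, hE]; rfl
          rw [hss, hen] at hfind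
          rw [hfind]
          simp only [pickSel, Option.map_some, hsi.2, eq_self_iff_true, if_true]
          rw [step si hsi.1 ((pvF segments si).drop 1)]
          simp only [chainB, hr, hS, hE]
          rfl
        | cons ei e' =>
          have hee : (u.filter (pvPe segments last)).head? = some ei := by rw [← heh, hE]; rfl
          have hei := head?_filter_some hee
          rw [hss, hee] at hfind
          by_cases hcmp : si ≤ ei
          · rw [hfind]
            simp only [pickSel, hcmp, if_true, Option.map_some, hsi.2, eq_self_iff_true]
            rw [step si hsi.1 ((pvF segments si).drop 1)]
            simp only [chainB, hr, hS, hE, hcmp, if_true]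
            rfl
          · have hbf : pvPs segments last ei = false := by
              by_contra hc
              have hc' : pvPs segments last ei = true := by simpa using hc
              exact hcmp (head?_filter_min hup hss ei hei.1 hc')
            rw [hfind]
            simp only [pickSel, hcmp, if_false, Option.map_some, hbf, Bool.false_eq_true]
            rw [step ei hei.1 ((pvF segments ei).dropLast.reverse)]
            simp only [chainB, hr, hS, hE, hcmp, if_false]
            rfl

theorem head?_eq_headD {l : List Int} (h : l ≠ []) : l.head? = some (l.headD 0) := by
  cases l with
  | nil => exact absurd rfl h
  | cons a t => rfl

theorem getLast?_eq_getLastD {l : List Int} (h : l ≠ []) : l.getLast? = some (l.getLastD 0) := by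
  cases hg : l.getLast? with
  | none => exact absurd (List.getLast?_eq_none_iff.mp hg) h
  | some a => simp [List.getLastD_eq_getLast?, hg]

-- B's one-pass index build, split into its two components
theorem build_split (segments : List (List Int)) : ∀ (l : List Nat)
    (d e : PySem.Dict Int (List Nat)),
    l.foldl (fun (se : PySem.Dict Int (List Nat) × PySem.Dict Int (List Nat)) i =>
        let seg := segments.getD i []
        (se.1.modify (seg.headD 0) [] (· ++ [i]),
         se.2.modify (seg.getLastD 0) [] (· ++ [i]))) (d, e)
      = (l.foldl (fun d i => d.modify ((segments.getD i []).headD 0) [] (· ++ [i])) d,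
         l.foldl (fun e i => e.modify ((segments.getD i []).getLastD 0) [] (· ++ [i])) e) := by
  intro l
  induction l with
  | nil => intro d e; rfl
  | cons i t ih => intro d e; simp only [List.foldl_cons]; exact ih _ _

-- a setdefault-append loop groups the indices by key, in order
theorem getD_build (key : Nat → Int) (l : List Nat) (v : Int) :
    (l.foldl (fun d i => d.modify (key i) [] (· ++ [i])) PySem.Dict.empty).getD v []
      = l.filter (fun i => key i == v) := by
  have h := PySem.Dict.getD_foldl_modify_append
    (l := l.map (fun i => (key i, i))) (d := PySem.Dict.empty) (c := v)
  rw [List.foldl_map] at h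
  simpa [List.filter_map, List.map_map, Function.comp_def] using h

theorem map_getD_range' (d : List Int) : ∀ (l : List (List Int)) (pre : List (List Int)),
    (List.range' pre.length l.length).map (fun i => (pre ++ l).getD i d) = l := by
  intro l
  induction l with
  | nil => intro pre; rfl
  | cons x t ih =>
    intro pre
    rw [List.length_cons, List.range'_succ, List.map_cons]
    have hx : (pre ++ x :: t).getD pre.length d = x := by
      simp [List.getD_eq_getElem?_getD, List.getElem?_append_right (le_refl pre.length)]
    have ht : (List.range' (pre.length + 1) t.length).map (fun i => (pre ++ x :: t).getD i d) = t := by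
      have hlen : pre.length + 1 = (pre ++ [x]).length := by simp
      have happ : pre ++ x :: t = (pre ++ [x]) ++ t := by simp
      rw [hlen, happ]
      exact ih (pre ++ [x])
    rw [hx, ht]

-- ===== VERDICT (by name: the statement is the Claim_ definition above) =====
theorem chain_ways_py_spec : Claim_equal_chain_ways_py := by
  intro segments hdom hpre
  unfold Spec_chain_ways_py
  obtain ⟨hpre1, _⟩ := hpre
  cases segments with
  | nil => rfl
  | cons first rest =>
    simp only [chain_ways_py, chain_ways_py_alt]
    rw [build_split]
    have hfne : ∀ i ∈ pvR ((first :: rest).length), pvF (first :: rest) i ≠ [] := by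
      intro i hi
      obtain ⟨h1, h2⟩ := mem_pvR_lt hi
      obtain ⟨i', rfl⟩ : ∃ i', i = i' + 1 := ⟨i - 1, by omega⟩
      have hi' : i' < rest.length := by simp at h2; omega
      have hval : pvF (first :: rest) (i' + 1) = rest[i'] := by
        simp [pvF, List.getD_eq_getElem?_getD, List.getElem?_cons_succ,
          List.getElem?_eq_getElem hi']
      rw [hval]
      exact hpre1 _ (List.getElem_mem hi')
    have hused : ∀ i ∈ pvR ((first :: rest).length),
        pvU ((List.replicate (first :: rest).length false).set 0 true) i = false := by
      intro i hi
      obtain ⟨h1, h2⟩ := mem_pvR_lt hi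
      have hne : (0 : Nat) ≠ i := by omega
      have h3 : i < (first :: rest).length := h2
      simp only [List.length_cons] at h3
      simp [pvU, List.getD_eq_getElem?_getD, List.getElem?_set, hne, List.getElem?_replicate, h3]
    have hfilt : (pvR ((first :: rest).length)).filter
        (fun i => !pvU ((List.replicate (first :: rest).length false).set 0 true) i)
        = pvR ((first :: rest).length) := by
      apply List.filter_eq_self.mpr
      intro i hi
      simpa using hused i hi
    have hmap : (pvR ((first :: rest).length)).map (pvF (first :: rest)) = rest := by
      have h := map_getD_range' [] rest [first]
      simpa [pvR, pvF] using h
    have hS : ∀ v, SuffInv ((List.replicate (first :: rest).length false).set 0 true)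
        ((pvR ((first :: rest).length)).filter (pvPs (first :: rest) v))
        (((pvR ((first :: rest).length)).foldl
          (fun d i => d.modify (((first :: rest).getD i []).headD 0) [] (· ++ [i]))
          PySem.Dict.empty).getD v []) := by
      intro v
      refine ⟨[], ?_, by simp⟩
      rw [getD_build]
      apply (List.filter_congr ?_).symm
      intro i hi
      have hh := head?_eq_headD (hfne i hi)
      simp only [pvPs, hh]
      simp [pvF]
    have hE : ∀ v, SuffInv ((List.replicate (first :: rest).length false).set 0 true)
        ((pvR ((first :: rest).length)).filter (pvPe (first :: rest) v))
        (((pvR ((first :: rest).length)).foldl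
          (fun e i => e.modify (((first :: rest).getD i []).getLastD 0) [] (· ++ [i]))
          PySem.Dict.empty).getD v []) := by
      intro v
      refine ⟨[], ?_, by simp⟩
      rw [getD_build]
      apply (List.filter_congr ?_).symm
      intro i hi
      have hl := getLast?_eq_getLastD (hfne i hi)
      simp only [pvPe, hl]
      simp [pvF]
    have hsim := sim (first :: rest) ((first :: rest).length) rfl hfne
      ((first :: rest).length - 1)
      ((List.replicate (first :: rest).length false).set 0 true)
      _ _ first
      (by simp)
      hS hE
      (by rw [hfilt]; simp [pvR])
    rw [hfilt, hmap] at hsim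
    exact hsim
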